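-- pv_equiv track=rewrite | github.com/megumi-ben/work13-wd | REI/mappings/debug_mask.py | build_mask_from_positions
-- ===== SOURCE A (Python) =====
-- from typing import Dict, List, Tuple
--
-- def build_mask_from_positions(k: int, positions: List[int], reverse: bool) -> str:
--     bits = ["0"] * k
--     for p in positions:
--         if not (0 <= p < k):
--             continue
--         idx = (k - 1 - p) if reverse else p
--         bits[idx] = "1"
--     return "".join(bits)
-- ===== SOURCE B (Python) =====
-- def build_mask_from_positions(k, positions, reverse):
--     # Sort the distinct valid target indices, then emit the mask as runs of
--     # '0's separated by single '1's -- no per-slot write or membership test.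
--     idxs = sorted({(k - 1 - p) if reverse else p for p in positions if 0 <= p < k})
--     parts = []
--     prev = -1
--     for i in idxs:
--         parts.append("0" * (i - prev - 1))
--         parts.append("1")
--         prev = i
--     parts.append("0" * (k - prev - 1))
--     return "".join(parts)
-- ===== Notes on version B (the rewrite author's own statement) =====
-- stated objective: alternative
-- what changed: B sorts the distinct valid target indices and emits the mask as run-length pieces ('0'*gap + '1') joined at the end, instead of A's preallocated mutable char list with scattered index writes.
import Mathlib
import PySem

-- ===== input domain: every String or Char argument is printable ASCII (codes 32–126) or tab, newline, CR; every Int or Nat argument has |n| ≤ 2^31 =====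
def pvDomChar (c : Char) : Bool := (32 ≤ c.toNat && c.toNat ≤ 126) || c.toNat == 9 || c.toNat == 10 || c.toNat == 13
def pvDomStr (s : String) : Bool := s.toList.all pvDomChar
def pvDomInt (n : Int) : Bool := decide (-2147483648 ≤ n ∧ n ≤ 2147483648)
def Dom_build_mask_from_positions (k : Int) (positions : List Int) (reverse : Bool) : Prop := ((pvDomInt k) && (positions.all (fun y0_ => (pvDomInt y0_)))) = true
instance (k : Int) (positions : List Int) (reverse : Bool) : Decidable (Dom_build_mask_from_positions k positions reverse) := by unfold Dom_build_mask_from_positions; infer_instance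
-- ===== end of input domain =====

-- B sorts the distinct valid target indices and emits the mask as run-length pieces
-- ('0'*gap + '1') joined at the end, instead of A's scattered writes into a preallocated
-- mutable char list (alternative algorithm, not claimed faster).

-- ===== PORT A =====
def build_mask_from_positions (k : Int) (positions : List Int) (reverse : Bool) : String :=
  -- bits = ["0"] * k  (elements are single characters; ported as List Char)
  let bits : List Char := List.replicate k.toNat '0'
  let bits := positions.foldl (fun bits p =>
    if 0 ≤ p ∧ p < k then
      let idx := if reverse then k - 1 - p else p
      PySem.List.pySetD bits idx '1'   -- bits[idx] = "1"; idx is always in range here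
    else bits) bits
  String.mk bits

-- ===== PORT B =====
def build_mask_from_positions_alt (k : Int) (positions : List Int) (reverse : Bool) : String :=
  -- idxs = sorted({...})
  let idxs : List Int := PySem.List.sorted (PySem.Set.ofList (positions.filterMap (fun p =>
      if 0 ≤ p ∧ p < k then some (if reverse then k - 1 - p else p) else none))) (fun x => x) false
  -- parts accumulated as a char list; prev threaded through the fold
  let st : List Char × Int := idxs.foldl (fun st i =>
      (st.1 ++ List.replicate (i - st.2 - 1).toNat '0' ++ ['1'], i)) ([], -1)
  String.mk (st.1 ++ List.replicate (k - st.2 - 1).toNat '0')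

-- ===== PRECONDITION & SPEC =====
def Spec_build_mask_from_positions (k : Int) (positions : List Int) (reverse : Bool) (out : String) : Prop := out = build_mask_from_positions_alt k positions reverse
instance (k : Int) (positions : List Int) (reverse : Bool) (out : String) : Decidable (Spec_build_mask_from_positions k positions reverse out) := by unfold Spec_build_mask_from_positions; infer_instance

-- ===== CLAIM =====
def Claim_equal_build_mask_from_positions : Prop := ∀ (k : Int) (positions : List Int) (reverse : Bool), Dom_build_mask_from_positions k positions reverse → Spec_build_mask_from_positions k positions reverse (build_mask_from_positions k positions reverse)

-- ===== LEMMAS AND PROOFS =====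

-- the filterMap function shared by the analysis
def pvIdxOf (k : Int) (reverse : Bool) (p : Int) : Option Int :=
  if 0 ≤ p ∧ p < k then some (if reverse then k - 1 - p else p) else none

-- recursive form of B's run emission
def pvEmit (k : Int) : Int → List Int → List Char
  | prev, [] => List.replicate (k - prev - 1).toNat '0'
  | prev, i :: tl => List.replicate (i - prev - 1).toNat '0' ++ '1' :: pvEmit k i tl

-- B's foldl-with-accumulator equals the recursive emission
lemma pvFoldB_eq_emit (k : Int) (idxs : List Int) (acc : List Char) (prev : Int) :
    (idxs.foldl (fun (st : List Char × Int) i =>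
      (st.1 ++ List.replicate (i - st.2 - 1).toNat '0' ++ ['1'], i)) (acc, prev)).1 ++
      List.replicate (k - (idxs.foldl (fun (st : List Char × Int) i =>
      (st.1 ++ List.replicate (i - st.2 - 1).toNat '0' ++ ['1'], i)) (acc, prev)).2 - 1).toNat '0'
    = acc ++ pvEmit k prev idxs := by
  induction idxs generalizing acc prev with
  | nil => simp [pvEmit]
  | cons i tl ih =>
      simp only [List.foldl_cons, pvEmit]
      rw [ih]
      simp

-- emission over a strictly increasing list in (prev, k) is the membership map over range(prev+1, k)
lemma pvEmit_eq_map (k : Int) (idxs : List Int) (prev : Int)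
    (hsorted : idxs.Pairwise (· < ·))
    (hbound : ∀ i ∈ idxs, prev < i ∧ i < k) :
    pvEmit k prev idxs = (PySem.List.pyRange (prev + 1) k 1).map
      (fun i => if i ∈ idxs then '1' else '0') := by
  induction idxs generalizing prev with
  | nil =>
      simp only [pvEmit, PySem.List.pyRange_one, List.map_map]
      rw [show ((fun i => if i ∈ ([] : List Int) then '1' else '0') ∘
            fun m : Nat => prev + 1 + (m : Int)) = (fun _ : Nat => '0') from by
          funext m; simp]
      rw [List.map_const', List.length_range]
      congr 1
      omega
  | cons i tl ih =>
      obtain ⟨hpi, hik⟩ := hbound i (List.mem_cons_self ..)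
      have hsplit : PySem.List.pyRange (prev + 1) k 1 =
          PySem.List.pyRange (prev + 1) i 1 ++ PySem.List.pyRange i k 1 := by
        apply PySem.List.pyRange_one_append <;> omega
      have hcons : PySem.List.pyRange i k 1 = i :: PySem.List.pyRange (i + 1) k 1 :=
        PySem.List.pyRange_one_cons hik
      rw [hsplit, hcons, List.map_append, List.map_cons]
      have h1 : (PySem.List.pyRange (prev + 1) i 1).map
          (fun j => if j ∈ i :: tl then '1' else '0')
          = List.replicate (i - prev - 1).toNat '0' := by
        rw [PySem.List.pyRange_one, List.map_map]
        have hlen : (i - (prev + 1)).toNat = (i - prev - 1).toNat := by omega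
        rw [show (fun j => if j ∈ i :: tl then '1' else '0') ∘ (fun m : Nat => prev + 1 + (m : Int))
            = fun m : Nat => if (prev + 1 + (m : Int)) ∈ i :: tl then '1' else '0' from rfl]
        rw [← hlen]
        apply List.eq_replicate_iff.mpr
        constructor
        · simp
        · intro c hc
          obtain ⟨m, hm, rfl⟩ := List.mem_map.mp hc
          have hmlt : (m : Int) < i - (prev + 1) := by
            have := List.mem_range.mp hm; omega
          have hne : prev + 1 + (m : Int) ∉ i :: tl := by
            intro hmem
            rcases List.mem_cons.mp hmem with h | h
            · omega
            · have := (hbound _ (List.mem_cons_of_mem _ h)).1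
              have := List.rel_of_pairwise_cons hsorted h
              omega
          simp [hne]
      have h2 : (if i ∈ i :: tl then '1' else '0') = '1' := by simp
      have h3 : (PySem.List.pyRange (i + 1) k 1).map
          (fun j => if j ∈ i :: tl then '1' else '0')
          = (PySem.List.pyRange (i + 1) k 1).map (fun j => if j ∈ tl then '1' else '0') := by
        apply List.map_congr_left
        intro j hj
        have hji : i < j := by
          have := (PySem.List.mem_pyRange_one.mp hj).1; omega
        have : j ∈ i :: tl ↔ j ∈ tl := by
          constructor
          · intro h; rcases List.mem_cons.mp h with h | h
            · omega
            · exact h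
          · exact List.mem_cons_of_mem _
        simp [this]
      rw [h1, h2, h3, ← ih i hsorted.of_cons (fun j hj => ⟨List.rel_of_pairwise_cons hsorted hj,
          (hbound j (List.mem_cons_of_mem _ hj)).2⟩)]
      simp [pvEmit]

-- A's loop preserves the length of bits
lemma pvFold_length (k : Int) (reverse : Bool) (ps : List Int) (bits : List Char) :
    (ps.foldl (fun bits p =>
      if 0 ≤ p ∧ p < k then
        PySem.List.pySetD bits (if reverse then k - 1 - p else p) '1'
      else bits) bits).length = bits.length := by
  induction ps generalizing bits with
  | nil => rfl
  | cons p tl ih =>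
      simp only [List.foldl_cons]
      rw [ih]
      split_ifs <;> simp [PySem.List.length_pySetD]

-- pointwise characterisation of A's loop result
lemma pvFold_getElem? (k : Int) (reverse : Bool) (ps : List Int) (bits : List Char)
    (hlen : bits.length = k.toNat) (i : Nat) (hi : i < bits.length) :
    (ps.foldl (fun bits p =>
      if 0 ≤ p ∧ p < k then
        PySem.List.pySetD bits (if reverse then k - 1 - p else p) '1'
      else bits) bits)[i]? =
    (if (i : Int) ∈ ps.filterMap (pvIdxOf k reverse) then some '1' else bits[i]?) := by
  induction ps generalizing bits with
  | nil => simp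
  | cons p tl ih =>
      simp only [List.foldl_cons]
      by_cases hp : 0 ≤ p ∧ p < k
      · have hidx0 : 0 ≤ (if reverse then k - 1 - p else p) := by
          split_ifs <;> omega
        have hsplit : (p :: tl).filterMap (pvIdxOf k reverse) =
            (if reverse then k - 1 - p else p) :: tl.filterMap (pvIdxOf k reverse) := by
          simp [pvIdxOf, hp]
        rw [if_pos hp, PySem.List.pySetD_of_nonneg _ _ hidx0,
            ih _ (by simp [hlen]) (by simpa using hi), hsplit]
        by_cases hmem : (i : Int) ∈ tl.filterMap (pvIdxOf k reverse)
        · rw [if_pos hmem, if_pos (List.mem_cons.mpr (Or.inr hmem))]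
        · by_cases heq : (i : Int) = (if reverse then k - 1 - p else p)
          · rw [if_neg hmem, if_pos (List.mem_cons.mpr (Or.inl heq))]
            have h1 : (if reverse then k - 1 - p else p).toNat = i := by omega
            simp [h1, hi]
          · have hnot : (i : Int) ∉ (if reverse then k - 1 - p else p) ::
                tl.filterMap (pvIdxOf k reverse) := by
              rw [List.mem_cons]; rintro (h | h); exacts [heq h, hmem h]
            rw [if_neg hmem, if_neg hnot]
            have h1 : (if reverse then k - 1 - p else p).toNat ≠ i := by omega
            simp [h1]
      · have hsplit : (p :: tl).filterMap (pvIdxOf k reverse) =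
            tl.filterMap (pvIdxOf k reverse) := by
          simp [pvIdxOf, hp]
        rw [if_neg hp, ih _ hlen hi, hsplit]

-- ===== VERDICT =====
theorem build_mask_from_positions_spec : Claim_equal_build_mask_from_positions := by
  intro k positions reverse _
  unfold Spec_build_mask_from_positions build_mask_from_positions build_mask_from_positions_alt
  simp only []
  -- name B's sorted index list
  set fm := positions.filterMap (fun p =>
      if 0 ≤ p ∧ p < k then some (if reverse then k - 1 - p else p) else none) with hfm
  set idxs := PySem.List.sorted (PySem.Set.ofList fm) (fun x => x) false with hidxs
  have hmemfm : ∀ j : Int, j ∈ idxs ↔ j ∈ positions.filterMap (pvIdxOf k reverse) := by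
    intro j
    rw [hidxs, PySem.List.mem_sorted, PySem.Set.mem_ofList, hfm]
    have : (fun p => if 0 ≤ p ∧ p < k then some (if reverse then k - 1 - p else p) else none)
        = pvIdxOf k reverse := by funext p; simp [pvIdxOf]
    rw [this]
  have hbound : ∀ j ∈ idxs, (-1 : Int) < j ∧ j < k := by
    intro j hj
    have := (hmemfm j).mp hj
    obtain ⟨p, _, hp⟩ := List.mem_filterMap.mp this
    unfold pvIdxOf at hp
    by_cases h : 0 ≤ p ∧ p < k
    · rw [if_pos h] at hp
      have := Option.some.inj hp
      split_ifs at this <;> omega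
    · simp [h] at hp
  have hsorted : idxs.Pairwise (· < ·) := PySem.List.sorted_ofList_pairwise_lt fm
  -- rewrite B's side into the membership map over range(0, k)
  rw [pvFoldB_eq_emit, List.nil_append,
      pvEmit_eq_map k idxs (-1) hsorted hbound]
  congr 1
  have hk1 : (-1 : Int) + 1 = 0 := by ring
  rw [hk1]
  -- now compare A's fold with the map, pointwise
  apply List.ext_getElem?
  intro i
  by_cases hik : i < k.toNat
  · have hi : i < (List.replicate k.toNat '0' : List Char).length := by simpa using hik
    rw [pvFold_getElem? k reverse positions _ (by simp) i hi]
    rw [List.getElem?_map]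
    have hr : (PySem.List.pyRange 0 k 1)[i]? = some (i : Int) := by
      rw [PySem.List.pyRange_one]
      simp [hik]
    rw [hr]
    simp only [Option.map_some]
    by_cases hmem : (i : Int) ∈ positions.filterMap (pvIdxOf k reverse)
    · simp [hmem, (hmemfm _).mpr hmem]
    · have : (i : Int) ∉ idxs := fun h => hmem ((hmemfm _).mp h)
      simp [hmem, this, hik]
  · have h1 : (positions.foldl (fun bits p =>
        if 0 ≤ p ∧ p < k then
          PySem.List.pySetD bits (if reverse then k - 1 - p else p) '1'
        else bits) (List.replicate k.toNat '0')).length ≤ i := by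
      rw [pvFold_length]; simp; omega
    have h2 : ((PySem.List.pyRange 0 k 1).map (fun j => if j ∈ idxs then '1' else '0')).length ≤ i := by
      rw [List.length_map, PySem.List.length_pyRange_one]; omega
    rw [List.getElem?_eq_none h1, List.getElem?_eq_none h2]
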